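-- pv_equiv track=rewrite | github.com/norikinishida/DiscourseConstituencyInduction-ViterbiEM | preprocessing/create_sentence_boundary_ptbwsj_wo_rstdt.py | assign_edu_ids_to_sentences
-- ===== SOURCE A (Python) =====
-- def assign_edu_ids_to_sentences(sentences, tokens_with_edu_ids):
--     """
--     :type sentences: list of list of str
--     :type tokens_with_edu_ids: list of int
--     :rtype: list of list of int
--     """
--     sentences_with_edu_ids = []
--     index = 0
--     for sentence in sentences:
--         length = len(sentence)
--         sentences_with_edu_ids.append(tokens_with_edu_ids[index:index+length])
--         index += length
--     return sentences_with_edu_ids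
-- ===== SOURCE B (Python) =====
-- def assign_edu_ids_to_sentences(sentences, tokens_with_edu_ids):
--     """
--     :type sentences: list of list of str
--     :type tokens_with_edu_ids: list of int
--     :rtype: list of list of int
--     """
--     quotas = [len(sentence) for sentence in sentences]
--     buckets = [[] for _ in quotas]
--     j = 0
--     for tok in tokens_with_edu_ids:
--         while j < len(quotas) and len(buckets[j]) >= quotas[j]:
--             j += 1
--         if j >= len(quotas):
--             break
--         buckets[j].append(tok)
--     return buckets
-- ===== Notes on version B (the rewrite author's own statement) =====
-- stated objective: alternative
-- what changed: Replaces A's sentence-driven loop that slices the token list at a running index by a token-driven distribution pass: quota buckets are pre-created and each token is appended to the current bucket, a cursor advancing past full buckets; no slicing occurs.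
import Mathlib
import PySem

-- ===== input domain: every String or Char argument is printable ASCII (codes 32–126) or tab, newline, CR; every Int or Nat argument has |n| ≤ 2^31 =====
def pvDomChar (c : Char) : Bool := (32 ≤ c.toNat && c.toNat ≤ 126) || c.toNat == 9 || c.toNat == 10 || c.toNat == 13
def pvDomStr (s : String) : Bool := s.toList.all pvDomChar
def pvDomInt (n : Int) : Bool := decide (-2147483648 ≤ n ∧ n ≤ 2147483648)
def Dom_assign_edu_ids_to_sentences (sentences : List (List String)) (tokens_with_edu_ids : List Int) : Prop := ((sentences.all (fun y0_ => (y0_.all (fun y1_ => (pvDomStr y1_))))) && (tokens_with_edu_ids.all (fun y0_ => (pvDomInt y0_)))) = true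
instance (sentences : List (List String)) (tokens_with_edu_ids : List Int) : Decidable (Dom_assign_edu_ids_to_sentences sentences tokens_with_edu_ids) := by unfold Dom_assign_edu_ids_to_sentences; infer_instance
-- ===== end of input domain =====

-- B replaces A's sentence-driven slicing loop (running index, one slice per sentence)
-- by a token-driven distribution pass: each token is appended to the current quota
-- bucket, advancing past full buckets (objective: alternative algorithm, no slicing).

-- ===== PORT A =====
def assign_edu_ids_to_sentences (sentences : List (List String)) (tokens_with_edu_ids : List Int) : List (List Int) :=
  (sentences.foldl
    (fun (st : List (List Int) × Int) sentence =>
      let length : Int := sentence.length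
      (st.1 ++ [PySem.List.slice tokens_with_edu_ids (some st.2) (some (st.2 + length))],
       st.2 + length))
    ([], 0)).1

-- ===== PORT B =====
-- B's mutable state (buckets array + cursor j) is represented functionally as
-- (filled buckets before j, current bucket j, remaining quotas from j on):
-- the buckets list Python returns is filled ++ current :: one [] per untouched quota.

-- the `while j < len(quotas) and len(buckets[j]) >= quotas[j]: j += 1` loop
def pvAdvance (filled : List (List Int)) (cur : List Int) :
    List Nat → List (List Int) × List Int × List Nat
  | [] => (filled, cur, [])
  | q :: qs =>
    if cur.length ≥ q then pvAdvance (filled ++ [cur]) [] qs else (filled, cur, q :: qs)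

-- one iteration of `for tok in tokens_with_edu_ids` (break modelled by the skip on [])
def pvStep (st : List (List Int) × List Int × List Nat) (tok : Int) :
    List (List Int) × List Int × List Nat :=
  let a := pvAdvance st.1 st.2.1 st.2.2
  match a.2.2 with
  | [] => a
  | _ :: _ => (a.1, a.2.1 ++ [tok], a.2.2)

-- `return buckets`
def pvFinalize (st : List (List Int) × List Int × List Nat) : List (List Int) :=
  match st.2.2 with
  | [] => st.1
  | _ :: qs => st.1 ++ st.2.1 :: qs.map (fun _ => [])

def assign_edu_ids_to_sentences_alt (sentences : List (List String)) (tokens_with_edu_ids : List Int) : List (List Int) :=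
  pvFinalize (tokens_with_edu_ids.foldl pvStep ([], [], sentences.map (fun s => s.length)))

-- ===== PRECONDITION & SPEC =====
def Spec_assign_edu_ids_to_sentences (sentences : List (List String)) (tokens_with_edu_ids : List Int) (out : List (List Int)) : Prop := out = assign_edu_ids_to_sentences_alt sentences tokens_with_edu_ids
instance (sentences : List (List String)) (tokens_with_edu_ids : List Int) (out : List (List Int)) : Decidable (Spec_assign_edu_ids_to_sentences sentences tokens_with_edu_ids out) := by unfold Spec_assign_edu_ids_to_sentences; infer_instance

-- ===== CLAIM (what is proved, stated in full; the proofs are below) =====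
def Claim_equal_assign_edu_ids_to_sentences : Prop := ∀ (sentences : List (List String)) (tokens_with_edu_ids : List Int), Dom_assign_edu_ids_to_sentences sentences tokens_with_edu_ids → Spec_assign_edu_ids_to_sentences sentences tokens_with_edu_ids (assign_edu_ids_to_sentences sentences tokens_with_edu_ids)

-- ===== LEMMAS AND PROOFS =====

-- reference value: the chunks cut out of toks by a quota list, via take/drop
def pvChunks : List Nat → List Int → List (List Int)
  | [], _ => []
  | q :: qs, toks => toks.take q :: pvChunks qs (toks.drop q)

-- A's loop equals pvChunks (offset form)
def pvSeg (tok : List Int) : Nat → List (List String) → List (List Int)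
  | _, [] => []
  | j, s :: ss => (tok.drop j).take s.length :: pvSeg tok (j + s.length) ss

theorem pvA_loop (tok : List Int) (ss : List (List String)) :
    ∀ (acc : List (List Int)) (j : Nat),
      (ss.foldl
        (fun (st : List (List Int) × Int) sentence =>
          let length : Int := sentence.length
          (st.1 ++ [PySem.List.slice tok (some st.2) (some (st.2 + length))],
           st.2 + length))
        (acc, (j : Int))).1 = acc ++ pvSeg tok j ss := by
  induction ss with
  | nil => intro acc j; simp [pvSeg]
  | cons s ss ih =>
    intro acc j
    simp only [List.foldl_cons, pvSeg]
    have hcast : (j : Int) + (s.length : Int) = ((j + s.length : Nat) : Int) := by push_cast; ring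
    rw [PySem.List.slice_natCast_add, hcast, ih]
    simp

theorem pvSeg_chunks (tok : List Int) (ss : List (List String)) :
    ∀ j : Nat, pvSeg tok j ss = pvChunks (ss.map (fun s => s.length)) (tok.drop j) := by
  induction ss with
  | nil => intro j; simp [pvSeg, pvChunks]
  | cons s ss ih =>
    intro j
    simp only [pvSeg, List.map_cons, pvChunks, List.drop_drop, ih]

theorem pvChunks_nilTok (qs : List Nat) : pvChunks qs [] = qs.map (fun _ => []) := by
  induction qs with
  | nil => rfl
  | cons q qs ih => simp [pvChunks, ih]

theorem pvAdv_lt (filled : List (List Int)) (cur : List Int) (q : Nat) (qs : List Nat)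
    (h : cur.length < q) : pvAdvance filled cur (q :: qs) = (filled, cur, q :: qs) := by
  simp [pvAdvance, Nat.not_le.mpr h]

theorem pvAdv_ge (filled : List (List Int)) (cur : List Int) (q : Nat) (qs : List Nat)
    (h : q ≤ cur.length) : pvAdvance filled cur (q :: qs) = pvAdvance (filled ++ [cur]) [] qs := by
  simp [pvAdvance, h]

theorem pvStep_nil (filled : List (List Int)) (cur : List Int) (t : Int) :
    pvStep (filled, cur, []) t = (filled, cur, []) := by
  simp [pvStep, pvAdvance]

theorem pvStep_lt (filled : List (List Int)) (cur : List Int) (q : Nat) (qs : List Nat) (t : Int)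
    (h : cur.length < q) : pvStep (filled, cur, q :: qs) t = (filled, cur ++ [t], q :: qs) := by
  simp [pvStep, pvAdv_lt _ _ _ _ h]

theorem pvStep_full (filled : List (List Int)) (cur : List Int) (q : Nat) (qs : List Nat) (t : Int)
    (h : q ≤ cur.length) : pvStep (filled, cur, q :: qs) t = pvStep (filled ++ [cur], [], qs) t := by
  simp [pvStep, pvAdv_ge _ _ _ _ h]

theorem pvStep_empty (ts : List Int) (filled : List (List Int)) (cur : List Int) :
    ts.foldl pvStep (filled, cur, []) = (filled, cur, []) := by
  induction ts with
  | nil => rfl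
  | cons t ts ih => rw [List.foldl_cons, pvStep_nil]; exact ih

-- main invariant of the token fold
theorem pvB_loop (toks : List Int) :
    ∀ (quotas : List Nat) (filled : List (List Int)) (cur : List Int),
      (∀ q qs, quotas = q :: qs → cur.length ≤ q) →
      pvFinalize (toks.foldl pvStep (filled, cur, quotas)) =
        filled ++ (match quotas with
          | [] => []
          | q :: qs => (cur ++ toks.take (q - cur.length)) ::
                       pvChunks qs (toks.drop (q - cur.length))) := by
  induction toks with
  | nil =>
    intro quotas filled cur _
    cases quotas with
    | nil => simp [pvFinalize]
    | cons q qs => simp [pvFinalize, pvChunks_nilTok]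
  | cons t ts ih =>
    intro quotas filled cur hinv
    induction quotas generalizing filled cur with
    | nil => rw [List.foldl_cons, pvStep_nil, pvStep_empty]; simp [pvFinalize]
    | cons q qs ihq =>
      have hle : cur.length ≤ q := hinv q qs rfl
      rcases Nat.lt_or_ge cur.length q with hlt | hge
      · -- bucket not full: append the token, continue with the outer IH
        rw [List.foldl_cons, pvStep_lt _ _ _ _ _ hlt,
          ih (q :: qs) filled (cur ++ [t]) (by intro q' qs' h; cases h; simp; omega)]
        have hq1 : q - cur.length = (q - (cur.length + 1)) + 1 := by omega
        simp only [List.length_append, List.length_cons, List.length_nil, Nat.zero_add, hq1,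
          List.take_succ_cons, List.drop_succ_cons]
        simp [List.append_assoc]
      · -- bucket full: the while loop closes it; recurse on the remaining quotas
        have hq : cur.length = q := Nat.le_antisymm hle hge
        rw [List.foldl_cons, pvStep_full _ _ _ _ _ hge, ← List.foldl_cons]
        rw [ihq (filled ++ [cur]) [] (by intro q' qs' h; simp)]
        have h0 : q - cur.length = 0 := by omega
        cases qs with
        | nil => simp [h0, pvChunks]
        | cons q' qs' => simp [h0, pvChunks, List.append_assoc]

-- ===== VERDICT (by name: the statement is the Claim_ definition above) =====
theorem assign_edu_ids_to_sentences_spec : Claim_equal_assign_edu_ids_to_sentences := by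
  intro sentences tok _
  show assign_edu_ids_to_sentences sentences tok = assign_edu_ids_to_sentences_alt sentences tok
  unfold assign_edu_ids_to_sentences assign_edu_ids_to_sentences_alt
  have h0 := pvA_loop tok sentences [] 0
  simp only [Nat.cast_zero] at h0
  rw [h0, List.nil_append, pvSeg_chunks tok sentences 0, List.drop_zero]
  rw [pvB_loop tok (sentences.map (fun s => s.length)) [] [] (by intro q qs h; simp)]
  cases hs : sentences.map (fun s => s.length) with
  | nil => simp [pvChunks]
  | cons q qs => simp [pvChunks]
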